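-- pv_equiv track=rewrite | github.com/Rickyzhaoweihan/Pankagent | rl_implementation/ddp_training/scripts/training_decision.py | should_force_train
-- ===== SOURCE A (Python) =====
-- from typing import Any, Dict, List, Optional, Tuple
--
-- def should_force_train(
--     history: List[Dict[str, Any]],
--     model_type: str,
--     force_interval: int,
-- ) -> bool:
--     """
--     Check if model should be force-trained based on interval.
--
--     Returns True if the model hasn't been trained in force_interval iterations.
--     """
--     if force_interval <= 0:
--         return False
--
--     if len(history) < force_interval:
--         return False
--
--     # Count iterations since last training
--     iterations_since_train = 0
--     for h in reversed(history):
--         if h.get('trained', {}).get(model_type, False):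
--             break
--         iterations_since_train += 1
--
--     return iterations_since_train >= force_interval
-- ===== SOURCE B (Python) =====
-- def should_force_train(history, model_type, force_interval):
--     if force_interval <= 0:
--         return False
--     if len(history) < force_interval:
--         return False
--     recent = history[-force_interval:]
--     return all(not h.get('trained', {}).get(model_type, False) for h in recent)
-- ===== Notes on version B (the rewrite author's own statement) =====
-- stated objective: simpler
-- what changed: Replaces the reversed-iteration counter-with-break and final comparison by a direct check that none of the last force_interval history entries is trained (a fixed window and an all-quantifier, no accumulator).
import Mathlib
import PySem

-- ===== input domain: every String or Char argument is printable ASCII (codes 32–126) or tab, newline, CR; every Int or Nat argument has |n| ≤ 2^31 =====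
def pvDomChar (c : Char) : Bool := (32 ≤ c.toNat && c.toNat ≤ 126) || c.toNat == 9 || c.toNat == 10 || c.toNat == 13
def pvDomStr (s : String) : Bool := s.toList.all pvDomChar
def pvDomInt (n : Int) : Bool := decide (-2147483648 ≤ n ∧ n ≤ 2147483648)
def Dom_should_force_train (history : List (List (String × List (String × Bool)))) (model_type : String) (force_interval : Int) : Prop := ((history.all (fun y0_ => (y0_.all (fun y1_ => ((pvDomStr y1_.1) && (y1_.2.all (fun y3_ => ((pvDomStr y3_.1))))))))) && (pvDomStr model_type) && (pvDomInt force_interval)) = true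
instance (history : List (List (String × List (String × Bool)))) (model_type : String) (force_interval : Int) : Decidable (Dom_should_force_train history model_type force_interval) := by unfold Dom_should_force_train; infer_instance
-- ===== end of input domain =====

-- B replaces A's reversed-iteration counter-with-break by checking that none of the
-- last force_interval entries is trained (objective: simpler).

-- ===== PORT A =====
-- h.get('trained', {}).get(model_type, False)
def sft_trained (h : List (String × List (String × Bool))) (model_type : String) : Bool :=
  PySem.Dict.getD (PySem.Dict.mk (PySem.Dict.getD (PySem.Dict.mk h) "trained" [])) model_type false

-- the 'for h in reversed(history)' loop with counter and break
def sft_loop (model_type : String) : List (List (String × List (String × Bool))) → Int → Int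
  | [], acc => acc
  | h :: t, acc =>
    if sft_trained h model_type then acc
    else sft_loop model_type t (acc + 1)

def should_force_train (history : List (List (String × List (String × Bool)))) (model_type : String) (force_interval : Int) : Bool :=
  if force_interval ≤ 0 then false
  else if (history.length : Int) < force_interval then false
  else decide (force_interval ≤ sft_loop model_type history.reverse 0)

-- ===== PORT B =====
def should_force_train_alt (history : List (List (String × List (String × Bool)))) (model_type : String) (force_interval : Int) : Bool :=
  if force_interval ≤ 0 then false
  else if (history.length : Int) < force_interval then false
  else
    (PySem.List.slice history (some (-force_interval)) none).all
      (fun h => !(PySem.Dict.getD (PySem.Dict.mk (PySem.Dict.getD (PySem.Dict.mk h) "trained" [])) model_type false))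

-- ===== PRECONDITION & SPEC =====
def Spec_should_force_train (history : List (List (String × List (String × Bool)))) (model_type : String) (force_interval : Int) (out : Bool) : Prop := out = should_force_train_alt history model_type force_interval
instance (history : List (List (String × List (String × Bool)))) (model_type : String) (force_interval : Int) (out : Bool) : Decidable (Spec_should_force_train history model_type force_interval out) := by unfold Spec_should_force_train; infer_instance

-- ===== CLAIM (what is proved, stated in full; the proofs are below) =====
def Claim_equal_should_force_train : Prop := ∀ (history : List (List (String × List (String × Bool)))) (model_type : String) (force_interval : Int), Dom_should_force_train history model_type force_interval → Spec_should_force_train history model_type force_interval (should_force_train history model_type force_interval)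

-- ===== LEMMAS AND PROOFS =====

-- the loop computes acc + length of the untrained prefix
theorem sft_loop_eq (model_type : String) (xs : List (List (String × List (String × Bool)))) (acc : Int) :
    sft_loop model_type xs acc = acc + ((xs.takeWhile (fun h => !sft_trained h model_type)).length : Int) := by
  induction xs generalizing acc with
  | nil => simp [sft_loop]
  | cons y t ih =>
    simp only [sft_loop, List.takeWhile]
    by_cases hy : sft_trained y model_type
    · simp [hy]
    · simp [hy, ih]; ring

theorem takeWhile_len_ge_iff {α : Type} (p : α → Bool) (n : Nat) (ys : List α) (hn : n ≤ ys.length) :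
    (n ≤ (ys.takeWhile p).length) ↔ (ys.take n).all p := by
  induction ys generalizing n with
  | nil => simp [Nat.le_zero.mp (by simpa using hn)]
  | cons y t ih =>
    cases n with
    | zero => simp
    | succ m =>
      simp only [List.takeWhile, List.take, List.all_cons]
      by_cases hy : p y
      · simp only [hy, List.length_cons, Nat.succ_le_succ_iff, Bool.true_and]
        exact ih m (by simpa using hn)
      · simp [hy]

theorem should_force_train_spec' (history : List (List (String × List (String × Bool)))) (model_type : String) (force_interval : Int) :
    should_force_train history model_type force_interval = should_force_train_alt history model_type force_interval := by
  unfold should_force_train should_force_train_alt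
  by_cases h0 : force_interval ≤ 0
  · simp [h0]
  · simp only [h0, if_false]
    by_cases h1 : (history.length : Int) < force_interval
    · simp [h1]
    · simp only [h1, if_false]
      set p : List (String × List (String × Bool)) → Bool :=
        fun h => !(PySem.Dict.getD (PySem.Dict.mk (PySem.Dict.getD (PySem.Dict.mk h) "trained" [])) model_type false) with hp
      have hk : force_interval = ((force_interval.toNat : Nat) : Int) := by omega
      have hkl : force_interval.toNat ≤ history.length := by omega
      have hneg : -force_interval = -((force_interval.toNat : Nat) : Int) := by omega
      have hslice : PySem.List.slice history (some (-force_interval)) none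
          = history.drop (history.length - force_interval.toNat) := by
        rw [hneg, PySem.List.slice_from_neg_natCast _ _ (by omega)]
      rw [hslice, sft_loop_eq]
      have hdrop : history.drop (history.length - force_interval.toNat)
          = (history.reverse.take force_interval.toNat).reverse := by
        rw [List.reverse_take]
        simp
      have htw : p = (fun h => !sft_trained h model_type) := by
        funext h; simp [hp, sft_trained]
      rw [hdrop, htw]
      have hiff := takeWhile_len_ge_iff (fun h => !sft_trained h model_type) force_interval.toNat history.reverse (by simpa using hkl)
      rw [List.all_reverse]
      by_cases hall : (history.reverse.take force_interval.toNat).all (fun h => !sft_trained h model_type) = true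
      · have h2 := hiff.mpr hall
        rw [hall]
        simp only [decide_eq_true_eq]
        omega
      · have h2 : ¬ force_interval.toNat ≤ (history.reverse.takeWhile (fun h => !sft_trained h model_type)).length :=
          fun hh => hall (hiff.mp hh)
        simp only [Bool.not_eq_true] at hall
        rw [hall]
        simp only [decide_eq_false_iff_not]
        omega

-- ===== VERDICT (by name: the statement is the Claim_ definition above) =====
theorem should_force_train_spec : Claim_equal_should_force_train := by
  intro history model_type force_interval _
  unfold Spec_should_force_train
  exact should_force_train_spec' history model_type force_interval
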